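-- pv_equiv track=rewrite | github.com/pypi-data/pypi-mirror-379 | packages/pyladoc/pyladoc-1.2.4.tar.gz/pyladoc-1.2.4/src/pyladoc/latex.py | inject_latex_command
-- ===== SOURCE A (Python) =====
-- def inject_latex_command(text: str, command: str) -> str:
--     """
--     Injects a provided LaTeX code under the last line
--     starting with \\usepackage.
--
--     Args:
--         text: input LaTeX code
--         command: code to inject
--
--     Returns:
--         LaTeX code with injected command
--     """
--     lines = text.splitlines()
--
--     last_package_index = -1
--     for i, line in enumerate(lines):
--         if line.strip().startswith("\\usepackage"):
--             last_package_index = i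
--
--     if last_package_index != -1:
--         lines.insert(last_package_index + 1, f"\n{command}\n")
--     else:
--         lines.append(f"\n{command}\n")
--
--     return '\n'.join(lines)
-- ===== SOURCE B (Python) =====
-- def inject_latex_command(text: str, command: str) -> str:
--     injected = f"\n{command}\n"
--     out = []
--     found = False
--     for line in reversed(text.splitlines()):
--         if not found and line.strip().startswith("\\usepackage"):
--             out.append(injected)
--             found = True
--         out.append(line)
--     out.reverse()
--     if not found:
--         out.append(injected)
--     return '\n'.join(out)
-- ===== Notes on version B (the rewrite author's own statement) =====
-- stated objective: alternative
-- what changed: B never computes an index or splices: it builds the output list directly in one right-to-left fold with an accumulator and a found flag, emitting the injected line inline the first time the predicate fires, whereas A searches for the last matching index over enumerate and then mutates the list with insert/append.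
import Mathlib
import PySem

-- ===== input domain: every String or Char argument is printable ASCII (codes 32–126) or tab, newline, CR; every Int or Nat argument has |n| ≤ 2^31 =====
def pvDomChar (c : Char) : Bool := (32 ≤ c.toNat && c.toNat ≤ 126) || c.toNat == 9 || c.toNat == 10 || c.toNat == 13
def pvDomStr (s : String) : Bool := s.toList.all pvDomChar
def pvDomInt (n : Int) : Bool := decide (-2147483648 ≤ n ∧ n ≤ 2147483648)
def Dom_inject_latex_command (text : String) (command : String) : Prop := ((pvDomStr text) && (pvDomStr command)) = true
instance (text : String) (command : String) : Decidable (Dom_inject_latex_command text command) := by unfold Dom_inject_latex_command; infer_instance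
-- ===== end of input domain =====

-- B builds the output directly in one right-to-left fold with an accumulator and a found flag (no index, no insert/splice), instead of A's last-index search plus list.insert; alternative decomposition, same cost.


-- ===== PORT A =====
-- forward pass: record the index of the last line whose strip() starts with "\usepackage"
def inject_latex_command (text : String) (command : String) : String :=
  let lines := PySem.Str.splitlines text
  let last_package_index : Int :=
    (PySem.List.enumerate lines 0).foldl
      (fun acc p => if PySem.Str.startswith (PySem.Str.strip p.2) "\\usepackage" then p.1 else acc)
      (-1)
  let lines' :=
    if last_package_index ≠ -1 then
      PySem.List.insert lines (last_package_index + 1) ("\n" ++ command ++ "\n")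
    else
      lines ++ ["\n" ++ command ++ "\n"]
  PySem.Str.join "\n" lines'

-- ===== PORT B =====
-- one fold over reversed(lines): Python appends to `out` at the end, so the fold
-- state is (out, found) with ++ [·] for append; then out.reverse(), then the
-- not-found append, exactly as in Source B.
def inject_latex_command_alt (text : String) (command : String) : String :=
  let injected := "\n" ++ command ++ "\n"
  let st :=
    (PySem.Str.splitlines text).reverse.foldl
      (fun (st : List String × Bool) line =>
        if !st.2 && PySem.Str.startswith (PySem.Str.strip line) "\\usepackage" then
          (st.1 ++ [injected] ++ [line], true)
        else
          (st.1 ++ [line], st.2))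
      ([], false)
  let out := st.1.reverse
  let out := if !st.2 then out ++ [injected] else out
  PySem.Str.join "\n" out

-- ===== PRECONDITION & SPEC =====
def Spec_inject_latex_command (text : String) (command : String) (out : String) : Prop := out = inject_latex_command_alt text command
instance (text : String) (command : String) (out : String) : Decidable (Spec_inject_latex_command text command out) := by unfold Spec_inject_latex_command; infer_instance

-- ===== CLAIM =====
def Claim_equal_inject_latex_command : Prop := ∀ (text : String) (command : String), Dom_inject_latex_command text command → Spec_inject_latex_command text command (inject_latex_command text command)

-- ===== LEMMAS AND PROOFS =====

def pvP (l : String) : Bool := PySem.Str.startswith (PySem.Str.strip l) "\\usepackage"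

-- index of the last line satisfying pvP, structurally
def pvLastIdx : List String → Option Nat
  | [] => none
  | l :: ls =>
      match pvLastIdx ls with
      | some j => some (j + 1)
      | none => if pvP l then some 0 else none

theorem pvLastIdx_lt_length (ls : List String) (j : Nat) (h : pvLastIdx ls = some j) :
    j < ls.length := by
  induction ls generalizing j with
  | nil => simp [pvLastIdx] at h
  | cons l ls ih =>
      simp only [pvLastIdx] at h
      cases hl : pvLastIdx ls with
      | some j' => rw [hl] at h; injection h with h; subst h; simpa using ih j' hl
      | none =>
          rw [hl] at h
          by_cases hp : pvP l
          · simp [hp] at h; subst h; simp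
          · simp [hp] at h

-- A's fold over enumerate computes pvLastIdx (shifted by the start index)
theorem pvFoldA (ls : List String) (s acc : Int) :
    (PySem.List.enumerate ls s).foldl
      (fun acc p => if PySem.Str.startswith (PySem.Str.strip p.2) "\\usepackage" then p.1 else acc) acc
      = match pvLastIdx ls with
        | some j => s + j
        | none => acc := by
  induction ls generalizing s acc with
  | nil => simp [PySem.List.enumerate_nil, pvLastIdx]
  | cons l ls ih =>
      rw [PySem.List.enumerate_cons]
      simp only [List.foldl_cons, pvLastIdx]
      rw [ih]
      cases hl : pvLastIdx ls with
      | some j => push_cast; ring_nf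
      | none => by_cases hp : pvP l <;> simp [pvP] at hp ⊢ <;> simp [hp]

-- B's fold over the reversed list: its state is the processed suffix (reversed),
-- with the injected line already in place iff pvLastIdx found a match
theorem pvFoldB (inj : String) (ls : List String) :
    ls.reverse.foldl
      (fun (st : List String × Bool) line =>
        if !st.2 && PySem.Str.startswith (PySem.Str.strip line) "\\usepackage" then
          (st.1 ++ [inj] ++ [line], true)
        else
          (st.1 ++ [line], st.2))
      ([], false)
    = match pvLastIdx ls with
      | some j => ((ls.take (j + 1) ++ inj :: ls.drop (j + 1)).reverse, true)
      | none => (ls.reverse, false) := by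
  induction ls with
  | nil => simp [pvLastIdx]
  | cons l ls ih =>
      rw [List.reverse_cons, List.foldl_append, ih]
      simp only [pvLastIdx]
      cases hl : pvLastIdx ls with
      | some j => simp
      | none =>
          by_cases hp : pvP l <;> simp [pvP] at hp <;>
            simp [pvP, hp, List.take, List.drop]

-- ===== VERDICT =====
theorem inject_latex_command_spec : Claim_equal_inject_latex_command := by
  intro text command _
  unfold Spec_inject_latex_command inject_latex_command inject_latex_command_alt
  simp only
  set lines := PySem.Str.splitlines text with hlines
  rw [pvFoldB ("\n" ++ command ++ "\n") lines]
  have hfold := pvFoldA lines 0 (-1)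
  cases hL : pvLastIdx lines with
  | none =>
      rw [hL] at hfold
      rw [hfold]
      simp
  | some j =>
      rw [hL] at hfold
      rw [hfold]
      have hj : j < lines.length := pvLastIdx_lt_length lines j hL
      have hne : (0 : Int) + (j : Int) ≠ -1 := by omega
      simp only [hne, ne_eq, not_false_iff, if_true]
      have h1 : (0 : Int) + (j : Int) + 1 = ((j + 1 : Nat) : Int) := by push_cast; ring
      rw [h1, PySem.List.insert_natCast lines (j + 1) _ (by omega)]
      simp
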